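-- pv_equiv track=rewrite | github.com/ireka6114/kaldi | egs/t04_en_constrained/s5/experiments/t04_stimulus_redesign/scripts/redesign_t04_pseudowords.py | build_minpair_graph
-- ===== SOURCE A (Python) =====
-- def levenshtein(a: str | list[str], b: str | list[str]) -> int:
--     aa = list(a)
--     bb = list(b)
--     if len(aa) < len(bb):
--         aa, bb = bb, aa
--     prev = list(range(len(bb) + 1))
--     for i, ca in enumerate(aa, 1):
--         cur = [i]
--         for j, cb in enumerate(bb, 1):
--             cur.append(min(prev[j] + 1, cur[-1] + 1, prev[j - 1] + (0 if ca == cb else 1)))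
--         prev = cur
--     return prev[-1]
--
-- def build_minpair_graph(words: list[str]) -> dict[str, set[str]]:
--     g = {w: set() for w in words}
--     for i, a in enumerate(words):
--         for b in words[i + 1 :]:
--             if len(a) == len(b) and levenshtein(a, b) == 1:
--                 g[a].add(b)
--                 g[b].add(a)
--     return g
-- ===== SOURCE B (Python) =====
-- def build_minpair_graph(words: list[str]) -> dict[str, set[str]]:
--     # Index every word under L "masked keys" (position, prefix, suffix); two
--     # distinct words are minimal pairs iff they share a masked key, so the
--     # quadratic all-pairs Levenshtein scan disappears.
--     buckets = {}
--     for j, w in enumerate(words):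
--         for p in range(len(w)):
--             buckets.setdefault((p, w[:p], w[p + 1:]), []).append(j)
--     g = {w: set() for w in words}
--     for w in g:
--         cand = sorted(j for p in range(len(w))
--                         for j in buckets[(p, w[:p], w[p + 1:])]
--                         if words[j] != w)
--         for j in cand:
--             g[w].add(words[j])
--     return g
-- ===== Notes on version B (the rewrite author's own statement) =====
-- stated objective: faster
-- what changed: Replaces the all-pairs Levenshtein-DP scan with a hash index that buckets each word under its len(w) masked keys (position, prefix, suffix); neighbours of a word are read off its own buckets, so no pair of non-neighbouring words is ever compared.
import Mathlib
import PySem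

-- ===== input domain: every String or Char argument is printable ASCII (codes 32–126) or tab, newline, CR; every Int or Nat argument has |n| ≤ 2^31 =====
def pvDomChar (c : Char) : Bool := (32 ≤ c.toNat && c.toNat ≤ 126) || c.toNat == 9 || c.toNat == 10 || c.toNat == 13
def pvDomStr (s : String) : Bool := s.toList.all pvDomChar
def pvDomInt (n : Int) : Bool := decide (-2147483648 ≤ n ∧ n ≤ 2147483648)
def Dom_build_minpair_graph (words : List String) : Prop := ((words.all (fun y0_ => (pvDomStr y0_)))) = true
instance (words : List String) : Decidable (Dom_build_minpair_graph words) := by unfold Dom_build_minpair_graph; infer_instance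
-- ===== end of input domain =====

-- B replaces A's all-pairs Levenshtein scan by a bucket index on the len(w) masked
-- keys (position, prefix, suffix) of each word; same-bucket distinct words are
-- exactly the minimal pairs, which makes B asymptotically faster (O(n·L²) vs O(n²·L²)).

-- ===== PORT A =====
def levRow (bb : List Char) (prev : List Int) (i : Int) (ca : Char) : List Int :=
  (PySem.List.enumerate bb 1).foldl
    (fun cur jcb =>
      cur ++ [min (min (PySem.List.pyGetD prev jcb.1 0 + 1) (PySem.List.pyGetD cur (-1) 0 + 1))
                  (PySem.List.pyGetD prev (jcb.1 - 1) 0 + (if jcb.2 = ca then 0 else 1))])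
    [i]

-- prev[j], prev[j-1], cur[-1] are always in range, so pyGetD (default 0) is exact
def levenshtein (a b : String) : Int :=
  let aa := a.toList
  let bb := b.toList
  let sw := if aa.length < bb.length then (bb, aa) else (aa, bb)
  let prev0 : List Int := PySem.List.pyRange 0 ((sw.2.length : Int) + 1) 1
  let prev := (PySem.List.enumerate sw.1 1).foldl (fun prev ica => levRow sw.2 prev ica.1 ica.2) prev0
  PySem.List.pyGetD prev (-1) 0

def build_minpair_graph (words : List String) : List (String × List String) :=
  let g0 : PySem.Dict String (List String) :=
    words.foldl (fun g w => g.insert w PySem.Set.empty) PySem.Dict.empty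
  let g := (PySem.List.enumerate words 0).foldl
    (fun g ia =>
      (PySem.List.slice words (some (ia.1 + 1)) none).foldl
        (fun g b =>
          if PySem.Str.len ia.2 = PySem.Str.len b ∧ levenshtein ia.2 b = 1 then
            (g.modify ia.2 [] (fun s => PySem.Set.add s b)).modify b [] (fun s => PySem.Set.add s ia.2)
          else g) g) g0
  g.items

-- ===== PORT B =====
def pvMaskKey (w : String) (p : Int) : Int × String × String :=
  (p, PySem.Str.slice w none (some p), PySem.Str.slice w (some (p + 1)) none)

def build_minpair_graph_alt (words : List String) : List (String × List String) :=
  let buckets : PySem.Dict (Int × String × String) (List Int) :=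
    (PySem.List.enumerate words 0).foldl
      (fun bk jw =>
        (PySem.List.pyRange 0 (PySem.Str.len jw.2) 1).foldl
          (fun bk p => bk.modify (pvMaskKey jw.2 p) [] (fun l => l ++ [jw.1])) bk)
      PySem.Dict.empty
  let g0 : PySem.Dict String (List String) :=
    words.foldl (fun g w => g.insert w PySem.Set.empty) PySem.Dict.empty
  -- 'for w in g': only values are mutated below, so the key list is fixed
  let g := g0.keys.foldl
    (fun g w =>
      let cand :=
        PySem.List.sorted
          ((PySem.List.pyRange 0 (PySem.Str.len w) 1).foldl
            (fun acc p =>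
              acc ++ (buckets.getD (pvMaskKey w p) []).filter
                       (fun j => ¬ (PySem.List.pyGetD words j "" = w)))
            [])
          (fun x => x) false
      cand.foldl (fun g j => g.modify w [] (fun s => PySem.Set.add s (PySem.List.pyGetD words j ""))) g)
    g0
  g.items

-- ===== PRECONDITION & SPEC =====
def Spec_build_minpair_graph (words : List String) (out : List (String × List String)) : Prop := out = build_minpair_graph_alt words
instance (words : List String) (out : List (String × List String)) : Decidable (Spec_build_minpair_graph words out) := by unfold Spec_build_minpair_graph; infer_instance

-- ===== CLAIM (what is proved, stated in full; the proofs are below) =====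
def Claim_equal_build_minpair_graph : Prop := ∀ (words : List String), Dom_build_minpair_graph words → Spec_build_minpair_graph words (build_minpair_graph words)

-- ===== LEMMAS AND PROOFS =====

def pvHam (u v : List Char) : Nat := (u.zip v).countP (fun p => decide (p.1 ≠ p.2))

def pvF : List Char → List Char → Nat
  | [], v => v.length
  | u, [] => u.length
  | c :: u, c' :: v =>
      min (min (pvF u (c' :: v) + 1) (pvF (c :: u) v + 1)) (pvF u v + (if c = c' then 0 else 1))

def pvCell (ca : Char) (prev : List Int) (i : Int) (bb : List Char) : Nat → Int
  | 0 => i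
  | j + 1 => min (min (prev.getD (j + 1) 0 + 1) (pvCell ca prev i bb j + 1))
                 (prev.getD j 0 + (if bb.getD j ' ' = ca then 0 else 1))


lemma pvCell_append (ca : Char) (prev : List Int) (i : Int) (bb : List Char) (c : Char) :
    ∀ j, j ≤ bb.length → pvCell ca prev i (bb ++ [c]) j = pvCell ca prev i bb j := by
  intro j hj
  induction j with
  | zero => rfl
  | succ j ih =>
    simp only [pvCell, ih (by omega)]
    have : (bb ++ [c]).getD j ' ' = bb.getD j ' ' := by
      simp [List.getD_eq_getElem?_getD, List.getElem?_append_left (by omega : j < bb.length)]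
    rw [this]

lemma levRow_eq (bb : List Char) (prev : List Int) (i : Int) (ca : Char) :
    levRow bb prev i ca = (List.range (bb.length + 1)).map (fun j => pvCell ca prev i bb j) := by
  induction bb using List.reverseRecOn with
  | nil => simp [levRow, PySem.List.enumerate, pvCell]
  | append_singleton bb c ih =>
    unfold levRow at *
    rw [PySem.List.enumerate_append, List.foldl_append, ih, PySem.List.enumerate_cons,
      PySem.List.enumerate_nil]
    simp only [List.foldl_cons, List.foldl_nil, List.length_append, List.length_cons,
      List.length_nil]
    have hlast : PySem.List.pyGetD ((List.range (bb.length + 1)).map (fun j => pvCell ca prev i bb j)) (-1) 0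
        = pvCell ca prev i bb bb.length := by
      rw [List.range_succ, List.map_append]
      exact PySem.List.pyGetD_neg_one_append_singleton _ _ _
    rw [hlast]
    have h1 : (1 : Int) + (bb.length : Int) = ((bb.length + 1 : Nat) : Int) := by push_cast; ring
    have h2 : ((bb.length + 1 : Nat) : Int) - 1 = ((bb.length : Nat) : Int) := by push_cast; ring
    rw [h1, h2]
    simp only [PySem.List.pyGetD_natCast]
    rw [show bb.length + (0 + 1) + 1 = (bb.length + 1) + 1 by omega, List.range_succ (n := bb.length + 1),
      List.map_append]
    congr 1
    · apply List.map_congr_left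
      intro j hj
      exact (pvCell_append ca prev i bb c j (by simp at hj; omega)).symm
    · simp only [List.map_cons, List.map_nil, List.cons.injEq, and_true]
      simp only [pvCell]
      rw [pvCell_append ca prev i bb c bb.length le_rfl]
      have : (bb ++ [c]).getD bb.length ' ' = c := by
        simp [List.getD_eq_getElem?_getD]
      rw [this]

def pvRowOf (p bb : List Char) : List Int :=
  (List.range (bb.length + 1)).map (fun t => (pvF p ((bb.take t).reverse) : Int))

lemma pvF_cons_nil (c : Char) (u : List Char) : pvF (c :: u) [] = u.length + 1 := by
  simp [pvF]

lemma pvF_cons_cons (c c' : Char) (u v : List Char) :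
    pvF (c :: u) (c' :: v) =
      min (min (pvF u (c' :: v) + 1) (pvF (c :: u) v + 1)) (pvF u v + (if c = c' then 0 else 1)) := by
  simp [pvF]

lemma pvCell_eq_F (p bb : List Char) (ca : Char) :
    ∀ j, j ≤ bb.length →
      pvCell ca (pvRowOf p bb) ((p.length : Int) + 1) bb j = (pvF (ca :: p) ((bb.take j).reverse) : Int) := by
  intro j hj
  induction j with
  | zero =>
    simp only [pvCell, List.take_zero, List.reverse_nil, pvF_cons_nil]
    push_cast
    ring
  | succ j ih =>
    have hjlt : j < bb.length := by omega
    have hgd1 : (pvRowOf p bb).getD (j + 1) 0 = (pvF p ((bb.take (j + 1)).reverse) : Int) := by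
      unfold pvRowOf; exact PySem.List.getD_map_range _ _ _ _ (by omega)
    have hgd0 : (pvRowOf p bb).getD j 0 = (pvF p ((bb.take j).reverse) : Int) := by
      unfold pvRowOf; exact PySem.List.getD_map_range _ _ _ _ (by omega)
    have htake : bb.take (j + 1) = bb.take j ++ [bb[j]] := by
      rw [List.take_add_one]
      simp [List.getElem?_eq_getElem hjlt]
    have hgetD : bb.getD j ' ' = bb[j] := by
      simp [List.getD_eq_getElem?_getD, List.getElem?_eq_getElem hjlt]
    simp only [pvCell, hgd1, hgd0, ih (by omega), hgetD, htake, List.reverse_append,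
      List.reverse_cons, List.reverse_nil, List.nil_append, List.singleton_append]
    rw [pvF_cons_cons]
    push_cast [Nat.cast_min]
    have : (if bb[j] = ca then (0:Int) else 1) = (if ca = bb[j] then (0:Int) else 1) := by
      by_cases h : ca = bb[j] <;> simp [h, eq_comm]
    rw [this]

lemma pvOuter (bb : List Char) :
    ∀ (aa p : List Char),
      (PySem.List.enumerate aa ((p.length : Int) + 1)).foldl
          (fun prev ica => levRow bb prev ica.1 ica.2) (pvRowOf p bb)
        = pvRowOf (aa.reverse ++ p) bb := by
  intro aa
  induction aa with
  | nil => intro p; simp [PySem.List.enumerate_nil]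
  | cons ca aa ih =>
    intro p
    rw [PySem.List.enumerate_cons, List.foldl_cons]
    have hrow : levRow bb (pvRowOf p bb) ((p.length : Int) + 1) ca = pvRowOf (ca :: p) bb := by
      rw [levRow_eq]
      unfold pvRowOf
      apply List.map_congr_left
      intro j hj
      exact pvCell_eq_F p bb ca j (by simp at hj; omega)
    rw [hrow]
    have hs : (p.length : Int) + 1 + 1 = (((ca :: p).length : Nat) : Int) + 1 := by
      simp only [List.length_cons]
      push_cast
      ring
    rw [hs, ih (ca :: p)]
    simp

lemma levenshtein_eq (a b : String) (h : a.toList.length = b.toList.length) :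
    levenshtein a b = (pvF a.toList.reverse b.toList.reverse : Int) := by
  unfold levenshtein
  have hlt : ¬ (a.toList.length < b.toList.length) := by omega
  simp only [if_neg hlt]
  have hprev0 : PySem.List.pyRange 0 ((b.toList.length : Int) + 1) 1 = pvRowOf [] b.toList := by
    rw [show (b.toList.length : Int) + 1 = ((b.toList.length + 1 : Nat) : Int) by push_cast; ring]
    rw [PySem.List.pyRange_zero_natCast]
    unfold pvRowOf
    apply List.map_congr_left
    intro t ht
    simp only [List.mem_range] at ht
    have : pvF [] ((b.toList.take t).reverse) = t := by
      simp only [pvF, List.length_reverse, List.length_take]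
      omega
    rw [this]
  rw [hprev0]
  have hout := pvOuter b.toList a.toList []
  simp only [List.length_nil, Nat.cast_zero, zero_add, List.append_nil] at hout
  rw [hout]
  unfold pvRowOf
  rw [List.range_succ, List.map_append, List.map_cons, List.map_nil,
    PySem.List.pyGetD_neg_one_append_singleton, List.take_length]

lemma pvHam_cons (c c' : Char) (u v : List Char) :
    pvHam (c :: u) (c' :: v) = (if c = c' then 0 else 1) + pvHam u v := by
  simp only [pvHam, List.zip_cons_cons, List.countP_cons]
  by_cases h : c = c' <;> simp [h] <;> omega

lemma pvHam_self (u : List Char) : pvHam u u = 0 := by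
  induction u with
  | nil => rfl
  | cons c u ih => simp [pvHam_cons, ih]

lemma pvHam_comm (u v : List Char) : pvHam u v = pvHam v u := by
  induction u generalizing v with
  | nil => cases v <;> rfl
  | cons c u ih =>
    cases v with
    | nil => rfl
    | cons c' v =>
      rw [pvHam_cons, pvHam_cons, ih]
      by_cases h : c = c' <;> simp [h, eq_comm]

lemma pvHam_eq_zero_iff (u v : List Char) (h : u.length = v.length) :
    pvHam u v = 0 ↔ u = v := by
  induction u generalizing v with
  | nil => cases v with | nil => simp [pvHam] | cons _ _ => simp at h
  | cons c u ih =>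
    cases v with
    | nil => simp at h
    | cons c' v =>
      simp only [List.length_cons, Nat.add_right_cancel_iff] at h
      rw [pvHam_cons]
      by_cases hc : c = c' <;> simp [hc, ih v h]

lemma pvF_eq_zero_iff (u v : List Char) : pvF u v = 0 ↔ u = v := by
  induction u generalizing v with
  | nil =>
    cases v <;> simp [pvF]
  | cons c u ih =>
    cases v with
    | nil => simp [pvF_cons_nil]
    | cons c' v =>
      rw [pvF_cons_cons]
      constructor
      · intro h
        rcases Nat.min_eq_zero_iff.mp h with h' | h'
        · rcases Nat.min_eq_zero_iff.mp h' with h'' | h'' <;> omega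
        · by_cases hc : c = c'
          · simp only [hc, if_pos rfl, Nat.add_zero] at h'
            rw [(ih v).mp h', hc]
          · simp [hc] at h'
      · intro he
        injection he with he1 he2
        subst he1; subst he2
        have h0 := (ih u).mpr rfl
        simp [h0]

lemma pvF_le_ham (u v : List Char) (h : u.length = v.length) : pvF u v ≤ pvHam u v := by
  induction u generalizing v with
  | nil => cases v with | nil => simp [pvF] | cons _ _ => simp at h
  | cons c u ih =>
    cases v with
    | nil => simp at h
    | cons c' v =>
      simp only [List.length_cons, Nat.add_right_cancel_iff] at h
      rw [pvF_cons_cons, pvHam_cons]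
      calc min (min (pvF u (c' :: v) + 1) (pvF (c :: u) v + 1)) (pvF u v + (if c = c' then 0 else 1))
          ≤ pvF u v + (if c = c' then 0 else 1) := Nat.min_le_right _ _
        _ ≤ pvHam u v + (if c = c' then 0 else 1) := by have := ih v h; omega
        _ = (if c = c' then 0 else 1) + pvHam u v := by omega

lemma pvF_one_ham (u v : List Char) (h : u.length = v.length) (h1 : pvF u v = 1) :
    pvHam u v = 1 := by
  induction u generalizing v with
  | nil =>
    cases v with | nil => simp [pvF] at h1 | cons _ _ => simp at h
  | cons c u ih =>
    cases v with
    | nil => simp at h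
    | cons c' v =>
      simp only [List.length_cons, Nat.add_right_cancel_iff] at h
      rw [pvF_cons_cons] at h1
      rw [pvHam_cons]
      have hmin : pvF u (c' :: v) + 1 = 1 ∨ pvF (c :: u) v + 1 = 1
          ∨ pvF u v + (if c = c' then 0 else 1) = 1 := by
        have ha := Nat.min_le_left (min (pvF u (c' :: v) + 1) (pvF (c :: u) v + 1)) (pvF u v + (if c = c' then 0 else 1))
        have hb := Nat.min_le_right (min (pvF u (c' :: v) + 1) (pvF (c :: u) v + 1)) (pvF u v + (if c = c' then 0 else 1))
        have hc := Nat.min_le_left (pvF u (c' :: v) + 1) (pvF (c :: u) v + 1)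
        have hd := Nat.min_le_right (pvF u (c' :: v) + 1) (pvF (c :: u) v + 1)
        rcases Nat.lt_or_ge (min (pvF u (c' :: v) + 1) (pvF (c :: u) v + 1)) (pvF u v + (if c = c' then 0 else 1)) with hlt | hge
        · rcases Nat.lt_or_ge (pvF u (c' :: v) + 1) (pvF (c :: u) v + 1) with h2 | h2 <;> omega
        · omega
      rcases hmin with he | he | he
      · exfalso
        have : u = c' :: v := (pvF_eq_zero_iff u (c' :: v)).mp (by omega)
        have := congrArg List.length this
        simp at this
        omega
      · exfalso
        have : c :: u = v := (pvF_eq_zero_iff (c :: u) v).mp (by omega)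
        have := congrArg List.length this
        simp at this
        omega
      · by_cases hc : c = c'
        · simp only [hc, if_true] at he ⊢
          simp only [Nat.add_zero] at he
          simp [ih v h he]
        · simp only [hc, if_false] at he ⊢
          have : u = v := (pvF_eq_zero_iff u v).mp (by omega)
          subst this
          simp [pvHam_self]

lemma pvF_one_iff (u v : List Char) (h : u.length = v.length) :
    pvF u v = 1 ↔ pvHam u v = 1 := by
  constructor
  · exact pvF_one_ham u v h
  · intro hh
    have hne : u ≠ v := by
      intro he; subst he; rw [pvHam_self] at hh; omega
    have h0 : pvF u v ≠ 0 := fun hz => hne ((pvF_eq_zero_iff u v).mp hz)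
    have hle : pvF u v ≤ 1 := hh ▸ pvF_le_ham u v h
    omega

lemma pvHam_reverse (u v : List Char) (h : u.length = v.length) :
    pvHam u.reverse v.reverse = pvHam u v := by
  have hz : ∀ (u v : List Char), u.length = v.length → u.reverse.zip v.reverse = (u.zip v).reverse := by
    intro u
    induction u with
    | nil => intro v hv; cases v with | nil => rfl | cons _ _ => simp at hv
    | cons c u ih =>
      intro v hv
      cases v with
      | nil => simp at hv
      | cons c' v =>
        simp only [List.length_cons, Nat.add_right_cancel_iff] at hv
        simp only [List.reverse_cons, List.zip_cons_cons]
        rw [List.zip_append (by simp [hv]), ih v hv]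
        simp
  unfold pvHam
  rw [hz u v h, List.countP_reverse]

abbrev pvNbr (w x : String) : Prop := w.toList.length = x.toList.length ∧ pvHam w.toList x.toList = 1

lemma pvCond_iff (a b : String) :
    (PySem.Str.len a = PySem.Str.len b ∧ levenshtein a b = 1) ↔ pvNbr a b := by
  unfold pvNbr
  have hsl : ∀ s : String, PySem.Str.len s = (s.toList.length : Int) := by
    intro s; simp [String.length_toList]
  rw [hsl a, hsl b]
  constructor
  · rintro ⟨h1, h2⟩
    have hlen : a.toList.length = b.toList.length := by exact_mod_cast h1
    refine ⟨hlen, ?_⟩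
    rw [levenshtein_eq a b hlen] at h2
    have : pvF a.toList.reverse b.toList.reverse = 1 := by exact_mod_cast h2
    rw [pvF_one_iff _ _ (by simp [hlen])] at this
    rwa [pvHam_reverse _ _ hlen] at this
  · rintro ⟨hlen, h2⟩
    refine ⟨by exact_mod_cast hlen, ?_⟩
    rw [levenshtein_eq a b hlen]
    have : pvF a.toList.reverse b.toList.reverse = 1 := by
      rw [pvF_one_iff _ _ (by simp [hlen]), pvHam_reverse _ _ hlen]
      exact h2
    exact_mod_cast this

lemma pvNbr_symm {w x : String} (h : pvNbr w x) : pvNbr x w :=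
  ⟨h.1.symm, by rw [pvHam_comm]; exact h.2⟩

lemma pvNbr_ne {w x : String} (h : pvNbr w x) : w ≠ x := by
  intro he; subst he
  have := h.2
  rw [pvHam_self] at this
  omega

lemma pvNbr_irrefl (w : String) : ¬ pvNbr w w := fun h => pvNbr_ne h rfl

-- masked-key test, list level
lemma pvMask_to_ham (u v : List Char) (p : Nat) (hp : p < u.length)
    (hlen : u.length = v.length) (ht : u.take p = v.take p)
    (hd : u.drop (p + 1) = v.drop (p + 1)) (hne : u ≠ v) : pvHam u v = 1 := by
  induction p generalizing u v with
  | zero =>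
    cases u with
    | nil => simp at hp
    | cons c u' =>
      cases v with
      | nil => simp at hlen
      | cons c' v' =>
        simp only [List.drop_succ_cons, List.drop_zero] at hd
        subst hd
        have hcc : c ≠ c' := fun he => hne (by rw [he])
        simp [pvHam_cons, hcc, pvHam_self]
  | succ p ih =>
    cases u with
    | nil => simp at hp
    | cons c u' =>
      cases v with
      | nil => simp at hlen
      | cons c' v' =>
        simp only [List.take_succ_cons, List.cons.injEq] at ht
        obtain ⟨rfl, ht'⟩ := ht
        simp only [List.drop_succ_cons] at hd
        have hne' : u' ≠ v' := fun he => hne (by rw [he])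
        have := ih u' v' (by simp at hp hlen ⊢; omega) (by simp at hlen; omega) ht' hd hne'
        simp [pvHam_cons, this]

lemma pvHam_to_mask (u v : List Char) (hlen : u.length = v.length) (hh : pvHam u v = 1) :
    ∃ p, p < u.length ∧ u.take p = v.take p ∧ u.drop (p + 1) = v.drop (p + 1) := by
  induction u generalizing v with
  | nil =>
    cases v with | nil => simp [pvHam] at hh | cons _ _ => simp at hlen
  | cons c u' ih =>
    cases v with
    | nil => simp at hlen
    | cons c' v' =>
      simp only [List.length_cons, Nat.add_right_cancel_iff] at hlen
      rw [pvHam_cons] at hh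
      by_cases hc : c = c'
      · simp only [hc, if_true] at hh
        simp only [Nat.zero_add] at hh
        obtain ⟨p, hp, ht, hd⟩ := ih v' hlen hh
        exact ⟨p + 1, by simp; omega, by simp [hc, ht], by simpa using hd⟩
      · simp only [hc, if_false] at hh
        have : pvHam u' v' = 0 := by omega
        have := (pvHam_eq_zero_iff u' v' hlen).mp this
        exact ⟨0, by simp, by simp, by simpa using this⟩

-- ===== Set toolkit =====

lemma pvFoldlAdd_mem_id {α : Type} [BEq α] [LawfulBEq α] (l : List α) :
    ∀ s : PySem.Set α, (∀ x ∈ l, x ∈ s) → l.foldl PySem.Set.add s = s := by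
  induction l with
  | nil => intro s _; rfl
  | cons x l ih =>
    intro s h
    rw [List.foldl_cons, PySem.Set.add_of_mem (h x (by simp))]
    exact ih s (fun y hy => h y (by simp [hy]))

lemma pvFoldlAdd_eq {α : Type} [BEq α] [LawfulBEq α] [DecidableEq α] (l : List α) :
    ∀ s : PySem.Set α, l.foldl PySem.Set.add s
      = s ++ (PySem.Set.ofList l).filter (fun x => decide (x ∉ s)) := by
  induction l with
  | nil => intro s; simp [PySem.Set.ofList]
  | cons x l ih =>
    intro s
    rw [List.foldl_cons]
    have hof : PySem.Set.ofList (x :: l) = [x] ++ (PySem.Set.ofList l).filter (fun y => decide (y ∉ ([x] : List α))) := by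
      have h1 : PySem.Set.ofList (x :: l) = l.foldl PySem.Set.add [x] := by
        rw [PySem.Set.ofList_eq_foldl, List.foldl_cons,
          PySem.Set.add_of_not_mem (List.not_mem_nil), List.nil_append]
      rw [h1, ih [x]]
    rw [hof]
    by_cases hx : x ∈ s
    · rw [PySem.Set.add_of_mem hx, ih s]
      congr 1
      rw [List.filter_append]
      have hfx : List.filter (fun y => decide (y ∉ s)) [x] = [] := by simp [hx]
      rw [hfx, List.nil_append, List.filter_filter]
      apply List.filter_congr
      intro y hy
      by_cases hys : y ∈ s
      · simp [hys]
      · have hyx : y ≠ x := fun he => hys (he ▸ hx)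
        simp [hys, hyx]
    · rw [PySem.Set.add_of_not_mem hx, ih (s ++ [x])]
      rw [List.filter_append]
      have hfx : List.filter (fun y => decide (y ∉ s)) [x] = [x] := by simp [hx]
      rw [hfx, List.filter_filter, List.append_assoc]
      congr 2
      apply List.filter_congr
      intro y hy
      by_cases hyx : y = x
      · subst hyx; simp
      · by_cases hys : y ∈ s <;> simp [hys, hyx]

lemma pvOfListCons {α : Type} [BEq α] [LawfulBEq α] [DecidableEq α] (x : α) (l : List α) :
    PySem.Set.ofList (x :: l) = x :: (PySem.Set.ofList l).filter (fun y => decide (y ≠ x)) := by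
  have h1 : PySem.Set.ofList (x :: l) = l.foldl PySem.Set.add [x] := by
    rw [PySem.Set.ofList_eq_foldl, List.foldl_cons,
      PySem.Set.add_of_not_mem (List.not_mem_nil), List.nil_append]
  rw [h1, pvFoldlAdd_eq]
  simp only [List.singleton_append]
  congr 1
  apply List.filter_congr
  intro y hy
  simp

lemma pvFoldlAdd_congr {α : Type} [BEq α] [LawfulBEq α] [DecidableEq α] (l₁ l₂ : List α)
    (h : PySem.Set.ofList l₁ = PySem.Set.ofList l₂) (s : PySem.Set α) :
    l₁.foldl PySem.Set.add s = l₂.foldl PySem.Set.add s := by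
  rw [pvFoldlAdd_eq, pvFoldlAdd_eq, h]

lemma pvOfListAppend_subset {α : Type} [BEq α] [LawfulBEq α] [DecidableEq α] (l₁ l₂ : List α)
    (h : ∀ x ∈ l₂, x ∈ l₁) :
    PySem.Set.ofList (l₁ ++ l₂) = PySem.Set.ofList l₁ := by
  rw [PySem.Set.ofList_eq_foldl, List.foldl_append, ← PySem.Set.ofList_eq_foldl]
  apply pvFoldlAdd_mem_id
  intro x hx
  rw [PySem.Set.mem_ofList]
  exact h x hx

lemma pvOfList_const {α : Type} [BEq α] [LawfulBEq α] (a : α) (l : List α)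
    (hmem : a ∈ l) (hall : ∀ x ∈ l, x = a) : PySem.Set.ofList l = [a] := by
  cases l with
  | nil => simp at hmem
  | cons x l =>
    have hxa : x = a := hall x (by simp)
    subst hxa
    rw [PySem.Set.ofList_eq_foldl, List.foldl_cons]
    have h1 : PySem.Set.add ([] : PySem.Set α) x = [x] := by simp [PySem.Set.add_of_not_mem]
    rw [h1]
    apply pvFoldlAdd_mem_id
    intro y hy
    simp [hall y (by simp [hy])]

-- ofList ∘ map is invariant under dropping elements whose image is already present
lemma pvFoldlAdd_map_filter {α γ : Type} [BEq α] [LawfulBEq α] (f : γ → α) (p : γ → Bool) :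
    ∀ (m : List γ) (s : PySem.Set α), (∀ y ∈ m, p y = false → f y ∈ s) →
      (m.map f).foldl PySem.Set.add s = ((m.filter p).map f).foldl PySem.Set.add s := by
  intro m
  induction m with
  | nil => intro s _; rfl
  | cons y m ih =>
    intro s h
    rw [List.map_cons, List.foldl_cons]
    cases hp : p y with
    | true =>
      rw [List.filter_cons_of_pos hp, List.map_cons, List.foldl_cons]
      apply ih
      intro z hz hpz
      rcases PySem.Set.mem_add s (f y) (f z) |>.mpr (Or.inl (h z (by simp [hz]) hpz)) with hm
      exact hm
    | false =>
      rw [List.filter_cons_of_neg (by simp [hp])]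
      rw [PySem.Set.add_of_mem (h y (by simp) hp)]
      apply ih
      intro z hz hpz
      exact h z (by simp [hz]) hpz

lemma pvOfListMap_dedup {α γ : Type} [BEq γ] [LawfulBEq γ] [DecidableEq γ] [BEq α] [LawfulBEq α] (f : γ → α) :
    ∀ (l : List γ) (s : PySem.Set α),
      (l.map f).foldl PySem.Set.add s = ((PySem.Set.ofList l).map f).foldl PySem.Set.add s := by
  intro l
  induction l with
  | nil => intro s; rfl
  | cons x l ih =>
    intro s
    rw [List.map_cons, List.foldl_cons, pvOfListCons, List.map_cons, List.foldl_cons, ih]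
    rw [← pvFoldlAdd_map_filter f (fun y => decide (y ≠ x))]
    intro y hy hpy
    simp only [decide_eq_true_eq, decide_eq_false_iff_not, Decidable.not_not] at hpy
    subst hpy
    rw [PySem.Set.mem_add]
    right; rfl

-- ===== A-side =====

def pvPairsOf : List String → List (String × String)
  | [] => []
  | a :: xs => xs.map (fun b => (a, b)) ++ pvPairsOf xs

def pvStep (g : PySem.Dict String (List String)) (p : String × String) : PySem.Dict String (List String) :=
  if PySem.Str.len p.1 = PySem.Str.len p.2 ∧ levenshtein p.1 p.2 = 1 then
    (g.modify p.1 [] (fun s => PySem.Set.add s p.2)).modify p.2 [] (fun s => PySem.Set.add s p.1)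
  else g

def pvEmits (E : List (String × String)) (w : String) : List String :=
  E.flatMap (fun p =>
    if PySem.Str.len p.1 = PySem.Str.len p.2 ∧ levenshtein p.1 p.2 = 1 then
      (if p.1 = w then [p.2] else []) ++ (if p.2 = w then [p.1] else [])
    else [])

lemma pvFlatten (words : List String) :
    ∀ (ws pre : List String) (g : PySem.Dict String (List String)), words = pre ++ ws →
      (PySem.List.enumerate ws ((pre.length : Nat) : Int)).foldl
        (fun g ia =>
          (PySem.List.slice words (some (ia.1 + 1)) none).foldl
            (fun g b =>
              if PySem.Str.len ia.2 = PySem.Str.len b ∧ levenshtein ia.2 b = 1 then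
                (g.modify ia.2 [] (fun s => PySem.Set.add s b)).modify b [] (fun s => PySem.Set.add s ia.2)
              else g) g) g
      = (pvPairsOf ws).foldl pvStep g := by
  intro ws
  induction ws with
  | nil => intro pre g _; simp [PySem.List.enumerate_nil, pvPairsOf]
  | cons a t ih =>
    intro pre g hw
    rw [PySem.List.enumerate_cons, List.foldl_cons]
    have hslice : PySem.List.slice words (some (((pre.length : Nat) : Int) + 1)) none = t := by
      rw [show ((pre.length : Nat) : Int) + 1 = ((pre.length + 1 : Nat) : Int) by push_cast; ring]
      rw [PySem.List.slice_from_natCast]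
      have hlen : pre.length + 1 = (pre ++ [a]).length := by simp
      rw [hw, List.append_cons, hlen, List.drop_left]
    rw [hslice]
    have hinner : (t.foldl
        (fun g b =>
          if PySem.Str.len a = PySem.Str.len b ∧ levenshtein a b = 1 then
            (g.modify a [] (fun s => PySem.Set.add s b)).modify b [] (fun s => PySem.Set.add s a)
          else g) g) = (t.map (fun b => (a, b))).foldl pvStep g := by
      rw [List.foldl_map]
      rfl
    rw [hinner]
    have hs : ((pre.length : Nat) : Int) + 1 = (((pre ++ [a]).length : Nat) : Int) := by
      simp
    rw [hs, ih (pre ++ [a]) _ (by simp [hw]), pvPairsOf, List.foldl_append]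

lemma pvStep_getD :
    ∀ (E : List (String × String)) (g : PySem.Dict String (List String)) (w : String),
      (E.foldl pvStep g).getD w [] = (pvEmits E w).foldl PySem.Set.add (g.getD w []) := by
  intro E
  induction E with
  | nil => intro g w; simp [pvEmits]
  | cons p E ih =>
    intro g w
    obtain ⟨a, b⟩ := p
    rw [List.foldl_cons, ih]
    unfold pvEmits
    rw [List.flatMap_cons]
    by_cases hc : PySem.Str.len a = PySem.Str.len b ∧ levenshtein a b = 1
    · have hnbr : pvNbr a b := (pvCond_iff a b).mp hc
      have hab : a ≠ b := pvNbr_ne hnbr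
      simp only [pvStep, if_pos hc]
      rw [List.foldl_append]
      congr 1
      by_cases hwb : w = b
      · subst hwb
        rw [PySem.Dict.getD_modify, if_pos rfl, PySem.Dict.getD_modify,
          if_neg (fun h => hab h.symm)]
        simp only [if_neg (fun h : a = w => hab h), if_pos rfl]
        simp
      · rw [PySem.Dict.getD_modify, if_neg hwb]
        by_cases hwa : w = a
        · subst hwa
          rw [PySem.Dict.getD_modify, if_pos rfl]
          simp only [if_pos rfl, if_neg (fun h : b = w => hwb h.symm)]
          simp
        · rw [PySem.Dict.getD_modify, if_neg hwa]
          simp only [if_neg (fun h : a = w => hwa h.symm), if_neg (fun h : b = w => hwb h.symm)]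
          simp
    · simp only [pvStep, if_neg hc]
      simp

lemma pvEmits_mem :
    ∀ (ws : List String) (w x : String), x ∈ pvEmits (pvPairsOf ws) w → x ∈ ws ∧ pvNbr w x := by
  intro ws
  induction ws with
  | nil => intro w x hx; simp [pvPairsOf, pvEmits] at hx
  | cons a t ih =>
    intro w x hx
    unfold pvEmits at hx
    rw [pvPairsOf, List.flatMap_append] at hx
    rcases List.mem_append.mp hx with hx | hx
    · rw [List.flatMap_map] at hx
      obtain ⟨b, hb, hxb⟩ := List.mem_flatMap.mp hx
      by_cases hc : PySem.Str.len a = PySem.Str.len b ∧ levenshtein a b = 1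
      · have hnbr : pvNbr a b := (pvCond_iff a b).mp hc
        simp only [Function.comp, if_pos hc] at hxb
        rcases List.mem_append.mp hxb with h | h
        · by_cases ha : a = w
          · simp only [if_pos ha] at h
            simp only [List.mem_singleton] at h
            subst h; subst ha
            exact ⟨by simp [hb], hnbr⟩
          · simp [ha] at h
        · by_cases hbw : b = w
          · simp only [if_pos hbw] at h
            simp only [List.mem_singleton] at h
            subst h; subst hbw
            exact ⟨by simp, pvNbr_symm hnbr⟩
          · simp [hbw] at h
      · simp only [Function.comp, if_neg hc] at hxb
        simp at hxb
    · obtain ⟨hxt, hnbr⟩ := ih w x hx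
      exact ⟨by simp [hxt], hnbr⟩

def pvEmitOne (w : String) (p : String × String) : List String :=
  if PySem.Str.len p.1 = PySem.Str.len p.2 ∧ levenshtein p.1 p.2 = 1 then
    (if p.1 = w then [p.2] else []) ++ (if p.2 = w then [p.1] else [])
  else []

lemma pvEmits_eq_flatMap (E : List (String × String)) (w : String) :
    pvEmits E w = E.flatMap (pvEmitOne w) := rfl

lemma pvHeadEmit_self (w : String) (t : List String) :
    t.flatMap (fun b => pvEmitOne w (w, b)) = t.filter (fun x => decide (pvNbr w x)) := by
  induction t with
  | nil => rfl
  | cons b t iht =>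
    rw [List.flatMap_cons, iht]
    by_cases hc : PySem.Str.len w = PySem.Str.len b ∧ levenshtein w b = 1
    · have hnbr : pvNbr w b := (pvCond_iff w b).mp hc
      have hbw : b ≠ w := fun h => pvNbr_ne hnbr h.symm
      simp only [pvEmitOne, if_pos hc, if_neg hbw]
      rw [List.filter_cons_of_pos (by simp [hnbr])]
      simp
    · have hnnbr : ¬ pvNbr w b := fun h => hc ((pvCond_iff w b).mpr h)
      simp only [pvEmitOne, if_neg hc]
      rw [List.filter_cons_of_neg (by simp [hnnbr])]
      simp

lemma pvHeadEmit_other (w a : String) (hwa : w ≠ a) (t : List String) :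
    t.flatMap (fun b => pvEmitOne w (a, b))
      = t.flatMap (fun b => if b = w ∧ pvNbr w a then [a] else []) := by
  apply List.flatMap_congr
  intro b hb
  unfold pvEmitOne
  have haw : a ≠ w := fun h => hwa h.symm
  by_cases hbw : b = w
  · by_cases hc : PySem.Str.len a = PySem.Str.len b ∧ levenshtein a b = 1
    · have hnbr : pvNbr w a := by rw [← hbw]; exact pvNbr_symm ((pvCond_iff a b).mp hc)
      rw [if_pos hc, if_neg haw, if_pos hbw, if_pos ⟨hbw, hnbr⟩]
      simp
    · have hnnbr : ¬ pvNbr w a := fun h => hc ((pvCond_iff a b).mpr (by rw [hbw]; exact pvNbr_symm h))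
      rw [if_neg hc, if_neg (by rintro ⟨h1, h2⟩; exact hnnbr h2)]
  · by_cases hc : PySem.Str.len a = PySem.Str.len b ∧ levenshtein a b = 1
    · rw [if_pos hc, if_neg haw, if_neg hbw, if_neg (by rintro ⟨h1, h2⟩; exact hbw h1)]
      simp
    · rw [if_neg hc, if_neg (by rintro ⟨h1, h2⟩; exact hbw h1)]

lemma pvA3 :
    ∀ (ws : List String) (w : String), w ∈ ws →
      PySem.Set.ofList (pvEmits (pvPairsOf ws) w)
        = PySem.Set.ofList (ws.filter (fun x => decide (pvNbr w x))) := by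
  intro ws
  induction ws with
  | nil => intro w hw; simp at hw
  | cons a t ih =>
    intro w hw
    rw [pvEmits_eq_flatMap, pvPairsOf, List.flatMap_append, List.flatMap_map, ← pvEmits_eq_flatMap]
    by_cases hwa : w = a
    · subst hwa
      rw [show (List.flatMap (fun b => pvEmitOne w (w, b)) t) = t.filter (fun x => decide (pvNbr w x)) from pvHeadEmit_self w t]
      rw [List.filter_cons_of_neg (by simp [pvNbr_irrefl])]
      apply pvOfListAppend_subset
      intro x hx
      obtain ⟨hxt, hnbr⟩ := pvEmits_mem t w x hx
      simp [List.mem_filter, hxt, hnbr]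
    · have hwt : w ∈ t := (List.mem_cons.mp hw).resolve_left hwa
      rw [show (List.flatMap (fun b => pvEmitOne w (a, b)) t)
          = t.flatMap (fun b => if b = w ∧ pvNbr w a then [a] else []) from pvHeadEmit_other w a hwa t]
      by_cases hnbr : pvNbr w a
      · have hflat : ∀ x ∈ t.flatMap (fun b => if b = w ∧ pvNbr w a then [a] else []), x = a := by
          intro x hx
          obtain ⟨b, hb, hxb⟩ := List.mem_flatMap.mp hx
          by_cases h : b = w ∧ pvNbr w a
          · simp only [if_pos h, List.mem_singleton] at hxb; exact hxb
          · simp [h] at hxb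
        have hmem : a ∈ t.flatMap (fun b => if b = w ∧ pvNbr w a then [a] else []) := by
          rw [List.mem_flatMap]
          exact ⟨w, hwt, by rw [if_pos ⟨rfl, hnbr⟩]; simp⟩
        rw [PySem.Set.ofList_eq_foldl, List.foldl_append, ← PySem.Set.ofList_eq_foldl]
        rw [pvOfList_const a _ hmem hflat]
        rw [List.filter_cons_of_pos (by simp [hnbr])]
        have hc : PySem.Set.ofList (a :: t.filter (fun x => decide (pvNbr w x)))
            = (t.filter (fun x => decide (pvNbr w x))).foldl PySem.Set.add [a] := by
          rw [PySem.Set.ofList_eq_foldl, List.foldl_cons,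
            PySem.Set.add_of_not_mem (List.not_mem_nil), List.nil_append]
        rw [hc]
        exact pvFoldlAdd_congr _ _ (ih w hwt) [a]
      · have hflat : t.flatMap (fun b => if b = w ∧ pvNbr w a then [a] else []) = [] := by
          rw [List.flatMap_eq_nil_iff]
          intro b hb
          simp [hnbr]
        rw [hflat, List.nil_append, List.filter_cons_of_neg (by simp [hnbr])]
        exact ih w hwt

-- ===== dict-level glue (shared by both sides) =====

def pvG0 (words : List String) : PySem.Dict String (List String) :=
  words.foldl (fun g w => g.insert w PySem.Set.empty) PySem.Dict.empty

lemma pvG0_keys (words : List String) : (pvG0 words).keys = PySem.Set.ofList words := by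
  unfold pvG0
  rw [PySem.Dict.keys_foldl_insert words (fun _ _ => PySem.Set.empty) PySem.Dict.empty]
  rw [PySem.Dict.keys_empty, PySem.Set.update_nil_left]

lemma pvG0_contains (words : List String) (w : String) (hw : w ∈ words) :
    (pvG0 words).contains w = true := by
  rw [PySem.Dict.contains_iff_mem_keys, pvG0_keys, PySem.Set.mem_ofList]
  exact hw

lemma pvG0_getD (words : List String) (w : String) : (pvG0 words).getD w [] = [] := by
  unfold pvG0
  have : ∀ (ws : List String) (g : PySem.Dict String (List String)),
      g.getD w [] = [] → (ws.foldl (fun g w => g.insert w PySem.Set.empty) g).getD w [] = [] := by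
    intro ws
    induction ws with
    | nil => intro g h; exact h
    | cons x ws ih =>
      intro g h
      rw [List.foldl_cons]
      apply ih
      rw [PySem.Dict.getD_insert]
      split
      · rfl
      · exact h
  exact this words PySem.Dict.empty (by rw [PySem.Dict.getD_empty])

lemma pvPairsOf_mem : ∀ (ws : List String) (p : String × String), p ∈ pvPairsOf ws → p.1 ∈ ws ∧ p.2 ∈ ws := by
  intro ws
  induction ws with
  | nil => intro p hp; simp [pvPairsOf] at hp
  | cons a t ih =>
    intro p hp
    rw [pvPairsOf, List.mem_append] at hp
    rcases hp with hp | hp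
    · obtain ⟨b, hb, rfl⟩ := List.mem_map.mp hp
      exact ⟨by simp, by simp [hb]⟩
    · obtain ⟨h1, h2⟩ := ih p hp
      exact ⟨by simp [h1], by simp [h2]⟩

lemma pvStep_keys :
    ∀ (E : List (String × String)) (g : PySem.Dict String (List String)),
      (∀ p ∈ E, g.contains p.1 = true ∧ g.contains p.2 = true) →
      (E.foldl pvStep g).keys = g.keys := by
  intro E
  induction E with
  | nil => intro g _; rfl
  | cons p E ih
    =>
    intro g h
    rw [List.foldl_cons]
    have hp := h p (by simp)
    have hkeys : (pvStep g p).keys = g.keys := by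
      unfold pvStep
      split
      · rw [PySem.Dict.keys_modify, PySem.Dict.keys_insert_of_contains, PySem.Dict.keys_modify,
          PySem.Dict.keys_insert_of_contains]
        · exact hp.1
        · rw [PySem.Dict.contains_modify, hp.2]
          simp
      · rfl
    have hcont : ∀ q ∈ E, (pvStep g p).contains q.1 = true ∧ (pvStep g p).contains q.2 = true := by
      intro q hq
      have hq' := h q (by simp [hq])
      unfold pvStep
      split
      · rw [PySem.Dict.contains_modify, PySem.Dict.contains_modify, hq'.1,
          PySem.Dict.contains_modify, PySem.Dict.contains_modify, hq'.2]
        simp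
      · exact hq'
    rw [ih (pvStep g p) hcont, hkeys]

-- ===== B-side =====

def pvKJ (words : List String) : List ((Int × String × String) × Int) :=
  (PySem.List.enumerate words 0).flatMap
    (fun jw => (PySem.List.pyRange 0 (PySem.Str.len jw.2) 1).map (fun p => (pvMaskKey jw.2 p, jw.1)))

def pvBuckets (words : List String) : PySem.Dict (Int × String × String) (List Int) :=
  (PySem.List.enumerate words 0).foldl
    (fun bk jw =>
      (PySem.List.pyRange 0 (PySem.Str.len jw.2) 1).foldl
        (fun bk p => bk.modify (pvMaskKey jw.2 p) [] (fun l => l ++ [jw.1])) bk)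
    PySem.Dict.empty

lemma pvBuckets_getD (words : List String) (c : Int × String × String) :
    (pvBuckets words).getD c []
      = ((pvKJ words).filter (fun q => q.1 == c)).map (fun q => q.2) := by
  unfold pvBuckets pvKJ
  have hinner : ∀ (jw : Int × String) (bk : PySem.Dict (Int × String × String) (List Int)),
      (PySem.List.pyRange 0 (PySem.Str.len jw.2) 1).foldl
          (fun bk p => bk.modify (pvMaskKey jw.2 p) [] (fun l => l ++ [jw.1])) bk
        = ((PySem.List.pyRange 0 (PySem.Str.len jw.2) 1).map (fun p => (pvMaskKey jw.2 p, jw.1))).foldl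
            (fun d q => d.modify q.1 [] (fun x => x ++ [q.2])) bk := by
    intro jw bk
    rw [List.foldl_map]
  have houter : ((PySem.List.enumerate words 0).foldl
      (fun bk jw =>
        (PySem.List.pyRange 0 (PySem.Str.len jw.2) 1).foldl
          (fun bk p => bk.modify (pvMaskKey jw.2 p) [] (fun l => l ++ [jw.1])) bk)
      PySem.Dict.empty)
      = ((PySem.List.enumerate words 0).flatMap
          (fun jw => (PySem.List.pyRange 0 (PySem.Str.len jw.2) 1).map (fun p => (pvMaskKey jw.2 p, jw.1)))).foldl
          (fun d q => d.modify q.1 [] (fun x => x ++ [q.2])) PySem.Dict.empty := by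
    rw [List.foldl_flatMap]
    apply PySem.List.foldl_congr_mem
    intro bk jw _
    exact hinner jw bk
  rw [houter, PySem.Dict.getD_foldl_modify_append, PySem.Dict.getD_empty, List.nil_append]

lemma pvMaskKey_eq_iff (x w : String) (q' q : Nat) :
    pvMaskKey x ((q' : Nat) : Int) = pvMaskKey w ((q : Nat) : Int)
      ↔ q' = q ∧ x.toList.take q' = w.toList.take q ∧ x.toList.drop (q' + 1) = w.toList.drop (q + 1) := by
  unfold pvMaskKey
  rw [Prod.ext_iff, Prod.ext_iff]
  have h1 : ∀ (s : String) (m : Nat), (PySem.Str.slice s none (some ((m : Nat) : Int))).toList = s.toList.take m := by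
    intro s m
    simp [PySem.List.slice_to_natCast]
  have h2 : ∀ (s : String) (m : Nat), (PySem.Str.slice s (some (((m : Nat) : Int) + 1)) none).toList = s.toList.drop (m + 1) := by
    intro s m
    calc (PySem.Str.slice s (some (((m : Nat) : Int) + 1)) none).toList
        = PySem.List.slice s.toList (some (((m : Nat) : Int) + 1)) none := by simp
      _ = s.toList.drop (m + 1) := by
          rw [show ((m : Nat) : Int) + 1 = ((m + 1 : Nat) : Int) by push_cast; ring,
            PySem.List.slice_from_natCast]
  dsimp only
  constructor
  · rintro ⟨ha, hb, hc⟩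
    have hq : q' = q := by exact_mod_cast ha
    subst hq
    refine ⟨rfl, ?_, ?_⟩
    · rw [← h1 x q', ← h1 w q', hb]
    · rw [← h2 x q', ← h2 w q', hc]
  · rintro ⟨rfl, hb, hc⟩
    refine ⟨rfl, ?_, ?_⟩
    · apply String.toList_inj.mp
      rw [h1, h1, hb]
    · apply String.toList_inj.mp
      rw [h2, h2, hc]

lemma pvMask_nbr (w x : String) (q : Nat) (hqw : q < w.toList.length) (hqx : q < x.toList.length)
    (hk : pvMaskKey x ((q : Nat) : Int) = pvMaskKey w ((q : Nat) : Int)) (hne : x ≠ w) : pvNbr w x := by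
  obtain ⟨-, ht, hd⟩ := (pvMaskKey_eq_iff x w q q).mp hk
  have hlen : w.toList.length = x.toList.length := by
    have h1 := congrArg List.length hd
    simp only [List.length_drop] at h1
    omega
  refine ⟨hlen, ?_⟩
  apply pvMask_to_ham w.toList x.toList q hqw hlen ht.symm hd.symm
  intro he
  exact hne (String.toList_inj.mp he.symm)

lemma pvNbr_mask (w x : String) (h : pvNbr w x) :
    ∃ q : Nat, q < w.toList.length ∧ q < x.toList.length
      ∧ pvMaskKey x ((q : Nat) : Int) = pvMaskKey w ((q : Nat) : Int) := by
  obtain ⟨hlen, hham⟩ := h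
  obtain ⟨q, hq, ht, hd⟩ := pvHam_to_mask w.toList x.toList hlen hham
  exact ⟨q, hq, by omega, (pvMaskKey_eq_iff x w q q).mpr ⟨rfl, ht.symm, hd.symm⟩⟩

lemma pvBucket_mem (words : List String) (c : Int × String × String) (j : Int) :
    j ∈ (pvBuckets words).getD c []
      ↔ ∃ (k : Nat), k < words.length ∧ j = (k : Int)
          ∧ ∃ (q : Nat), q < (words.getD k "").toList.length
          ∧ pvMaskKey (words.getD k "") ((q : Nat) : Int) = c := by
  rw [pvBuckets_getD, List.mem_map]
  constructor
  · rintro ⟨z, hz, rfl⟩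
    rw [List.mem_filter] at hz
    obtain ⟨hzKJ, hzc⟩ := hz
    have hzc' : z.1 = c := by simpa using hzc
    unfold pvKJ at hzKJ
    obtain ⟨jw, hjw, hz⟩ := List.mem_flatMap.mp hzKJ
    obtain ⟨p, hp, rfl⟩ := List.mem_map.mp hz
    obtain ⟨k, hk, rfl⟩ := (PySem.List.mem_enumerate_iff _ _ _).mp hjw
    rw [PySem.List.mem_pyRange_one] at hp
    have hlenw : PySem.Str.len words[k] = (words[k].toList.length : Int) := by
      simp [String.length_toList]
    refine ⟨k, hk, by simp, p.toNat, ?_, ?_⟩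
    · rw [List.getD_eq_getElem?_getD, List.getElem?_eq_getElem hk]
      simp only [Option.getD_some]
      rw [hlenw] at hp
      omega
    · rw [List.getD_eq_getElem?_getD, List.getElem?_eq_getElem hk]
      simp only [Option.getD_some]
      rw [show ((p.toNat : Nat) : Int) = p by rw [Int.toNat_of_nonneg] <;> simp at hp ⊢ <;> omega]
      simpa using hzc'
  · rintro ⟨k, hk, rfl, q, hq, hkey⟩
    refine ⟨(pvMaskKey (words.getD k "") ((q : Nat) : Int), (k : Int)), ?_, rfl⟩
    rw [List.mem_filter]
    constructor
    · unfold pvKJ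
      rw [List.mem_flatMap]
      refine ⟨((0 : Int) + (k : Nat), words[k]), ?_, ?_⟩
      · rw [PySem.List.mem_enumerate_iff]
        exact ⟨k, hk, rfl⟩
      · rw [List.mem_map]
        refine ⟨((q : Nat) : Int), ?_, ?_⟩
        · rw [PySem.List.mem_pyRange_one]
          have : PySem.Str.len words[k] = (words[k].toList.length : Int) := by
            simp [String.length_toList]
          rw [List.getD_eq_getElem?_getD, List.getElem?_eq_getElem hk] at hq
          simp only [Option.getD_some] at hq
          constructor
          · positivity
          · rw [this]; exact_mod_cast hq
        · rw [List.getD_eq_getElem?_getD, List.getElem?_eq_getElem hk]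
          simp
    · simp only [beq_iff_eq]
      exact hkey

def pvCand (words : List String) (w : String) : List Int :=
  PySem.List.sorted
    ((PySem.List.pyRange 0 (PySem.Str.len w) 1).foldl
      (fun acc p =>
        acc ++ ((pvBuckets words).getD (pvMaskKey w p) []).filter
                 (fun j => ¬ (PySem.List.pyGetD words j "" = w)))
      [])
    (fun x => x) false

lemma pvCand_mem (words : List String) (w : String) (j : Int) :
    j ∈ pvCand words w
      ↔ ∃ (k : Nat), k < words.length ∧ j = (k : Int) ∧ pvNbr w (words.getD k "") := by
  unfold pvCand
  rw [PySem.List.mem_sorted, PySem.List.foldl_append_eq_flatMap, List.nil_append, List.mem_flatMap]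
  have hwlen : PySem.Str.len w = (w.toList.length : Int) := by simp [String.length_toList]
  constructor
  · rintro ⟨p, hp, hj⟩
    rw [PySem.List.mem_pyRange_one] at hp
    rw [List.mem_filter] at hj
    obtain ⟨hjb, hjf⟩ := hj
    have hqw : p.toNat < w.toList.length := by rw [hwlen] at hp; omega
    have hpq : p = ((p.toNat : Nat) : Int) := by omega
    rw [hpq] at hjb
    obtain ⟨k, hk, rfl, q, hq, hkey⟩ := (pvBucket_mem words _ j).mp hjb
    obtain ⟨hqq, -, -⟩ := (pvMaskKey_eq_iff _ _ _ _).mp hkey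
    subst hqq
    have hget : PySem.List.pyGetD words ((k : Nat) : Int) "" = words.getD k "" := by
      simp
    rw [hget] at hjf
    have hne : words.getD k "" ≠ w := by simpa using hjf
    exact ⟨k, hk, rfl, pvMask_nbr w (words.getD k "") p.toNat hqw hq hkey hne⟩
  · rintro ⟨k, hk, rfl, hnbr⟩
    obtain ⟨q, hqw, hqx, hkey⟩ := pvNbr_mask w (words.getD k "") hnbr
    refine ⟨((q : Nat) : Int), ?_, ?_⟩
    · rw [PySem.List.mem_pyRange_one, hwlen]
      constructor
      · positivity
      · exact_mod_cast hqw
    · rw [List.mem_filter]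
      refine ⟨(pvBucket_mem words _ _).mpr ⟨k, hk, rfl, q, hqx, hkey⟩, ?_⟩
      have hget : PySem.List.pyGetD words ((k : Nat) : Int) "" = words.getD k "" := by simp
      rw [hget]
      simpa using pvNbr_ne hnbr ∘ Eq.symm

def pvI2 (words : List String) (w : String) : List Int :=
  (PySem.List.pyRange 0 ((words.length : Nat) : Int) 1).filter
    (fun j => decide (pvNbr w (PySem.List.pyGetD words j "")))

lemma pvI2_mem (words : List String) (w : String) (j : Int) :
    j ∈ pvI2 words w ↔ ∃ (k : Nat), k < words.length ∧ j = (k : Int) ∧ pvNbr w (words.getD k "") := by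
  unfold pvI2
  rw [List.mem_filter, PySem.List.mem_pyRange_one]
  constructor
  · rintro ⟨⟨h0, hn⟩, hd⟩
    have hjk : j = ((j.toNat : Nat) : Int) := by omega
    refine ⟨j.toNat, by omega, hjk, ?_⟩
    rw [hjk, PySem.List.pyGetD_natCast] at hd
    simpa using hd
  · rintro ⟨k, hk, rfl, hnbr⟩
    refine ⟨⟨by positivity, by exact_mod_cast hk⟩, ?_⟩
    have : PySem.List.pyGetD words ((k : Nat) : Int) "" = words.getD k "" := by simp
    rw [this]
    simpa using hnbr

lemma pvI2_pairwise (words : List String) (w : String) :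
    (pvI2 words w).Pairwise (fun a b : Int => a < b) := by
  unfold pvI2
  exact (PySem.List.pairwise_lt_pyRange_one _ _).sublist List.filter_sublist

lemma pvOfList_sublist {α : Type} [BEq α] [LawfulBEq α] [DecidableEq α] :
    ∀ (l : List α), (PySem.Set.ofList l).Sublist l := by
  intro l
  induction l with
  | nil => simp [PySem.Set.ofList]
  | cons x l ih =>
    rw [pvOfListCons]
    exact List.Sublist.cons₂ x (List.filter_sublist.trans ih)

lemma pvOfCand (words : List String) (w : String) :
    PySem.Set.ofList (pvCand words w) = pvI2 words w := by
  have hnd : (PySem.Set.ofList (pvCand words w)).Nodup := PySem.Set.nodup_ofList _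
  have hle : (pvCand words w).Pairwise (fun a b : Int => a ≤ b) := by
    have := PySem.List.sorted_pairwise
      ((PySem.List.pyRange 0 (PySem.Str.len w) 1).foldl
        (fun acc p =>
          acc ++ ((pvBuckets words).getD (pvMaskKey w p) []).filter
                   (fun j => ¬ (PySem.List.pyGetD words j "" = w)))
        []) (fun x : Int => x)
    exact this
  have hle' : (PySem.Set.ofList (pvCand words w)).Pairwise (fun a b : Int => a ≤ b) :=
    hle.sublist (pvOfList_sublist _)
  have hlt : (PySem.Set.ofList (pvCand words w)).Pairwise (fun a b : Int => a < b) := by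
    have hne : (PySem.Set.ofList (pvCand words w)).Pairwise (fun a b : Int => a ≠ b) := hnd
    exact (hle'.and hne).imp (fun h => lt_of_le_of_ne h.1 h.2)
  have hperm : (pvI2 words w).Perm (PySem.Set.ofList (pvCand words w)) := by
    apply (List.perm_ext_iff_of_nodup ((pvI2_pairwise words w).imp ne_of_lt) hnd).mpr
    intro j
    rw [PySem.Set.mem_ofList, pvI2_mem, pvCand_mem]
  calc PySem.Set.ofList (pvCand words w)
      = PySem.List.sorted (PySem.Set.ofList (pvCand words w)) (fun x : Int => x) :=
        (PySem.List.sorted_eq_self_of_pairwise _ _ hle').symm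
    _ = pvI2 words w := PySem.List.sorted_eq_of_perm_of_pairwise_lt _ _ _ hperm (pvI2_pairwise words w)

lemma pvFilterIdx (P : String → Bool) :
    ∀ (ws : List String),
      ((List.range ws.length).filter (fun k => P (ws.getD k ""))).map (fun k => ws.getD k "")
        = ws.filter P := by
  intro ws
  induction ws with
  | nil => simp
  | cons a t ih =>
    rw [List.length_cons, List.range_succ_eq_map, List.filter_cons]
    have hc : ∀ k, ((a :: t).getD (Nat.succ k) "") = t.getD k "" := by
      intro k; rfl
    have hfm : ((List.range t.length).map Nat.succ).filter (fun k => P ((a :: t).getD k ""))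
        = ((List.range t.length).filter (fun k => P (t.getD k ""))).map Nat.succ := by
      rw [List.filter_map]
      rfl
    have hcomp : ((fun k => (a :: t).getD k "") ∘ Nat.succ) = (fun k => t.getD k "") :=
      funext (fun k => hc k)
    by_cases hPa : P a = true
    · rw [if_pos (by simpa using hPa), List.map_cons, hfm, List.map_map, hcomp, ih,
        List.filter_cons_of_pos hPa]
      simp
    · rw [if_neg (by simpa using hPa), List.filter_cons_of_neg hPa, hfm, List.map_map, hcomp, ih]

lemma pvI2_map (words : List String) (w : String) :
    (pvI2 words w).map (fun j => PySem.List.pyGetD words j "")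
      = words.filter (fun x => decide (pvNbr w x)) := by
  unfold pvI2
  rw [PySem.List.pyRange_zero_natCast, List.filter_map, List.map_map]
  have h1 : ((fun j => decide (pvNbr w (PySem.List.pyGetD words j ""))) ∘ (fun k : Nat => (k : Int)))
      = fun k : Nat => decide (pvNbr w (words.getD k "")) := by
    funext k
    simp [Function.comp]
  have h2 : ((fun j => PySem.List.pyGetD words j "") ∘ (fun k : Nat => (k : Int)))
      = fun k : Nat => words.getD k "" := by
    funext k
    simp [Function.comp]
  rw [h1, h2]
  exact pvFilterIdx (fun x => decide (pvNbr w x)) words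

def pvLook (words : List String) (j : Int) : String := PySem.List.pyGetD words j ""

def pvBInner (words : List String) (w : String) (cs : List Int) (g : PySem.Dict String (List String)) :
    PySem.Dict String (List String) :=
  cs.foldl (fun g j => g.modify w [] (fun s => PySem.Set.add s (PySem.List.pyGetD words j ""))) g

lemma pvBInner_getD_self (words : List String) (w : String) :
    ∀ (cs : List Int) (g : PySem.Dict String (List String)),
      (pvBInner words w cs g).getD w []
        = (cs.map (fun j => PySem.List.pyGetD words j "")).foldl PySem.Set.add (g.getD w []) := by
  intro cs
  induction cs with
  | nil => intro g; rfl
  | cons j cs ih =>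
    intro g
    unfold pvBInner at *
    rw [List.foldl_cons, ih, List.map_cons, List.foldl_cons, PySem.Dict.getD_modify, if_pos rfl]

lemma pvBInner_getD_ne (words : List String) (w w' : String) (hne : w' ≠ w) :
    ∀ (cs : List Int) (g : PySem.Dict String (List String)),
      (pvBInner words w cs g).getD w' [] = g.getD w' [] := by
  intro cs
  induction cs with
  | nil => intro g; rfl
  | cons j cs ih =>
    intro g
    unfold pvBInner at *
    rw [List.foldl_cons, ih, PySem.Dict.getD_modify, if_neg hne]

lemma pvBInner_contains (words : List String) (w : String) :
    ∀ (cs : List Int) (g : PySem.Dict String (List String)) (k : String),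
      g.contains k = true → (pvBInner words w cs g).contains k = true := by
  intro cs
  induction cs with
  | nil => intro g k h; exact h
  | cons j cs ih =>
    intro g k h
    unfold pvBInner at *
    rw [List.foldl_cons]
    apply ih
    rw [PySem.Dict.contains_modify, h]
    simp

lemma pvBInner_keys (words : List String) (w : String) :
    ∀ (cs : List Int) (g : PySem.Dict String (List String)),
      g.contains w = true → (pvBInner words w cs g).keys = g.keys := by
  intro cs
  induction cs with
  | nil => intro g _; rfl
  | cons j cs ih =>
    intro g h
    unfold pvBInner at *
    rw [List.foldl_cons, ih, PySem.Dict.keys_modify, PySem.Dict.keys_insert_of_contains _ _ h]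
    rw [PySem.Dict.contains_modify, h]
    simp

def pvBOut (words : List String) (ks : List String) (g : PySem.Dict String (List String)) :
    PySem.Dict String (List String) :=
  ks.foldl (fun g w => pvBInner words w (pvCand words w) g) g

lemma pvBOut_getD_notmem (words : List String) :
    ∀ (ks : List String) (g : PySem.Dict String (List String)) (w : String), w ∉ ks →
      (pvBOut words ks g).getD w [] = g.getD w [] := by
  intro ks
  induction ks with
  | nil => intro g w _; rfl
  | cons k ks ih =>
    intro g w hw
    unfold pvBOut at *
    rw [List.foldl_cons, ih _ _ (fun h => hw (by simp [h])),
      pvBInner_getD_ne words k w (fun h => hw (by simp [h]))]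

lemma pvBOut_getD (words : List String) :
    ∀ (ks : List String) (g : PySem.Dict String (List String)) (w : String),
      ks.Nodup → w ∈ ks →
      (pvBOut words ks g).getD w []
        = ((pvCand words w).map (fun j => PySem.List.pyGetD words j "")).foldl PySem.Set.add (g.getD w []) := by
  intro ks
  induction ks with
  | nil => intro g w _ hw; simp at hw
  | cons k ks ih =>
    intro g w hnd hw
    unfold pvBOut at *
    rw [List.foldl_cons]
    by_cases hwk : w = k
    · subst hwk
      have hnotin : w ∉ ks := (List.nodup_cons.mp hnd).1
      have hnm := pvBOut_getD_notmem words ks (pvBInner words w (pvCand words w) g) w hnotin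
      unfold pvBOut at hnm
      rw [hnm, pvBInner_getD_self]
    · have hwks : w ∈ ks := (List.mem_cons.mp hw).resolve_left hwk
      rw [ih _ w (List.nodup_cons.mp hnd).2 hwks, pvBInner_getD_ne words k w hwk]

lemma pvBOut_keys (words : List String) :
    ∀ (ks : List String) (g : PySem.Dict String (List String)),
      (∀ w ∈ ks, g.contains w = true) → (pvBOut words ks g).keys = g.keys := by
  intro ks
  induction ks with
  | nil => intro g _; rfl
  | cons k ks ih =>
    intro g h
    unfold pvBOut at *
    rw [List.foldl_cons, ih, pvBInner_keys words k _ _ (h k (by simp))]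
    intro w hw
    exact pvBInner_contains words k _ _ _ (h w (by simp [hw]))

-- ===== final characterizations =====

lemma pvA_eq (words : List String) :
    build_minpair_graph words = ((pvPairsOf words).foldl pvStep (pvG0 words)).items := by
  unfold build_minpair_graph
  have h := pvFlatten words words [] (pvG0 words) rfl
  simp only [List.length_nil, Nat.cast_zero] at h
  exact congrArg PySem.Dict.items h

def pvCanon (words : List String) : List (String × List String) :=
  (PySem.Set.ofList words).map
    (fun w => (w, PySem.Set.ofList (words.filter (fun x => decide (pvNbr w x)))))

lemma pvA_final (words : List String) : build_minpair_graph words = pvCanon words := by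
  rw [pvA_eq]
  have hcont : ∀ p ∈ pvPairsOf words, (pvG0 words).contains p.1 = true ∧ (pvG0 words).contains p.2 = true := by
    intro p hp
    obtain ⟨h1, h2⟩ := pvPairsOf_mem words p hp
    exact ⟨pvG0_contains words _ h1, pvG0_contains words _ h2⟩
  have hkeys : ((pvPairsOf words).foldl pvStep (pvG0 words)).keys = PySem.Set.ofList words := by
    rw [pvStep_keys _ _ hcont, pvG0_keys]
  have hnd : ((pvPairsOf words).foldl pvStep (pvG0 words)).keys.Nodup := by
    rw [hkeys]; exact PySem.Set.nodup_ofList _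
  rw [PySem.Dict.items_eq_map_keys _ hnd [], hkeys]
  unfold pvCanon
  apply List.map_congr_left
  intro w hw
  have hwmem : w ∈ words := (PySem.Set.mem_ofList words w).mp hw
  rw [pvStep_getD, pvG0_getD, ← PySem.Set.ofList_eq_foldl, pvA3 words w hwmem]

lemma pvB_eq (words : List String) :
    build_minpair_graph_alt words = (pvBOut words (pvG0 words).keys (pvG0 words)).items := rfl

lemma pvB_final (words : List String) : build_minpair_graph_alt words = pvCanon words := by
  rw [pvB_eq]
  have hkeys0 : (pvG0 words).keys = PySem.Set.ofList words := pvG0_keys words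
  have hcont : ∀ w ∈ (pvG0 words).keys, (pvG0 words).contains w = true := by
    intro w hw
    rw [PySem.Dict.contains_iff_mem_keys]
    exact hw
  have hkeys : (pvBOut words (pvG0 words).keys (pvG0 words)).keys = PySem.Set.ofList words := by
    rw [pvBOut_keys words _ _ hcont, hkeys0]
  have hnd : (pvBOut words (pvG0 words).keys (pvG0 words)).keys.Nodup := by
    rw [hkeys]; exact PySem.Set.nodup_ofList _
  rw [PySem.Dict.items_eq_map_keys _ hnd [], hkeys]
  unfold pvCanon
  apply List.map_congr_left
  intro w hw
  have hwkeys : w ∈ (pvG0 words).keys := by rw [hkeys0]; exact hw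
  have hndk : (pvG0 words).keys.Nodup := by rw [hkeys0]; exact PySem.Set.nodup_ofList _
  rw [pvBOut_getD words _ _ w hndk hwkeys, pvG0_getD, pvOfListMap_dedup, pvOfCand,
    ← PySem.Set.ofList_eq_foldl, pvI2_map]

theorem pv_main (words : List String) : build_minpair_graph words = build_minpair_graph_alt words := by
  rw [pvA_final, pvB_final]

-- ===== VERDICT (by name: the statement is the Claim_ definition above) =====
theorem build_minpair_graph_spec : Claim_equal_build_minpair_graph := by
  intro words _
  unfold Spec_build_minpair_graph
  exact pv_main words
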